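-- pv_equiv track=rewrite | github.com/benmandrew/lstar | parser/mona.py | concrete_transitions
-- ===== SOURCE A (Python) =====
-- from copy import deepcopy
--
-- def bool_list_to_str(bl):
--     return "".join(["1" if b else "0" for b in bl])
--
-- def concrete_transitions(t):
--     """Generate all concrete transitions from an abstract transition of the form:
--         01X0X
--     Where 0 is a negated literal, 1 is positive,
--     and X is either negative or positive, i.e. both satisfy the edge.
--     """
--
--     def f(i, t, acc):
--         if i >= len(t):
--             return acc
--         if t[i] is None:
--             other = deepcopy(acc)
--             for el_acc, el_other in zip(acc, other):
--                 el_acc.append(True)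
--                 el_other.append(False)
--             return f(i + 1, t, acc + other)
--         elif t[i]:
--             for el in acc:
--                 el.append(True)
--             return f(i + 1, t, acc)
--         else:
--             for el in acc:
--                 el.append(False)
--             return f(i + 1, t, acc)
--
--     res = f(0, t, [[]])
--     return [bool_list_to_str(bl) for bl in res]
-- ===== SOURCE B (Python) =====
-- def concrete_transitions(t):
--     result = [""]
--     for c in t:
--         if c is None:
--             result = [s + "1" for s in result] + [s + "0" for s in result]
--         elif c:
--             result = [s + "1" for s in result]
--         else:
--             result = [s + "0" for s in result]
--     return result
-- ===== Notes on version B (the rewrite author's own statement) =====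
-- stated objective: simpler
-- what changed: Replaces the recursive index-driven fold over lists of booleans (with deepcopy and in-place appends, joined to strings at the end) by a single iterative loop that builds the concrete strings directly.
import Mathlib
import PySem

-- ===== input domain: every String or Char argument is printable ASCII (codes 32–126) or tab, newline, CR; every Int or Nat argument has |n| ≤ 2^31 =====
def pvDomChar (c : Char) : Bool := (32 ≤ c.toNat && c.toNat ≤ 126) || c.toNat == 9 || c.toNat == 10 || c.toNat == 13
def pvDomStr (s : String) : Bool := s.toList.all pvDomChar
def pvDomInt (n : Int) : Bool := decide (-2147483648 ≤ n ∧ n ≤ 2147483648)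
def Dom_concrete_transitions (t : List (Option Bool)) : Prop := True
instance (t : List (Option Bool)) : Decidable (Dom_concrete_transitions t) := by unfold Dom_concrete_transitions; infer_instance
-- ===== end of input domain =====

-- B replaces the recursive boolean-list fold (with deepcopy) by a single iterative loop building the strings directly: simpler, same cost.
-- ===== PORT A =====
def bool_list_to_str (bl : List Bool) : String :=
  String.join (bl.map (fun b => if b then "1" else "0"))

-- recursion on the remaining suffix of t (Python's f recursing on index i)
def pvF (rest : List (Option Bool)) (acc : List (List Bool)) : List (List Bool) :=
  match rest with
  | [] => acc
  | none :: rs => pvF rs (acc.map (fun el => el ++ [true]) ++ acc.map (fun el => el ++ [false]))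
  | some b :: rs =>
      if b then pvF rs (acc.map (fun el => el ++ [true]))
      else pvF rs (acc.map (fun el => el ++ [false]))

def concrete_transitions (t : List (Option Bool)) : List String :=
  (pvF t [[]]).map bool_list_to_str

-- ===== PORT B =====
def concrete_transitions_alt (t : List (Option Bool)) : List String :=
  t.foldl (fun result c =>
    match c with
    | none => result.map (fun s => s ++ "1") ++ result.map (fun s => s ++ "0")
    | some true => result.map (fun s => s ++ "1")
    | some false => result.map (fun s => s ++ "0")) [""]

-- ===== PRECONDITION & SPEC =====
def Spec_concrete_transitions (t : List (Option Bool)) (out : List String) : Prop := out = concrete_transitions_alt t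
instance (t : List (Option Bool)) (out : List String) : Decidable (Spec_concrete_transitions t out) := by unfold Spec_concrete_transitions; infer_instance

-- ===== CLAIM (what is proved, stated in full; the proofs are below) =====
def Claim_equal_concrete_transitions : Prop := ∀ (t : List (Option Bool)), Dom_concrete_transitions t → Spec_concrete_transitions t (concrete_transitions t)

-- ===== LEMMAS AND PROOFS =====
lemma bool_list_to_str_append (bl : List Bool) (b : Bool) :
    bool_list_to_str (bl ++ [b]) = bool_list_to_str bl ++ (if b then "1" else "0") := by
  simp [bool_list_to_str, String.join]

lemma comp_bit (b : Bool) :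
    (bool_list_to_str ∘ fun el => el ++ [b])
      = ((fun s => s ++ (if b then "1" else "0")) ∘ bool_list_to_str) := by
  funext bl; simp [bool_list_to_str_append]

lemma pvF_map (rest : List (Option Bool)) (acc : List (List Bool)) :
    (pvF rest acc).map bool_list_to_str
      = List.foldl (fun result c =>
          match c with
          | none => result.map (fun s => s ++ "1") ++ result.map (fun s => s ++ "0")
          | some true => result.map (fun s => s ++ "1")
          | some false => result.map (fun s => s ++ "0")) (acc.map bool_list_to_str) rest := by
  induction rest generalizing acc with
  | nil => simp [pvF]
  | cons c rs ih =>
    cases c with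
    | none =>
      rw [pvF, ih]
      have h1 := comp_bit true
      have h0 := comp_bit false
      simp only [if_true, if_false, Bool.false_eq_true] at h1 h0
      simp [h1, h0]
    | some b =>
      have h1 := comp_bit true
      have h0 := comp_bit false
      simp only [if_true, if_false, Bool.false_eq_true] at h1 h0
      cases b <;> simp only [pvF, if_true, if_false, Bool.false_eq_true] <;>
        rw [ih] <;> simp [h1, h0]

-- ===== VERDICT (by name: the statement is the Claim_ definition above) =====
theorem concrete_transitions_spec : Claim_equal_concrete_transitions := by
  intro t _
  show concrete_transitions t = concrete_transitions_alt t
  rw [concrete_transitions, concrete_transitions_alt, pvF_map]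
  simp [bool_list_to_str, String.join]
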